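-- pv_equiv track=rewrite | github.com/DeveloperDankyMan/Ro-Nav | main.py | is_boundary_vertex
-- ===== SOURCE A (Python) =====
-- from typing import Dict, Any, List, Tuple, Optional
--
-- def is_boundary_vertex(vertex_id: int, surfaces: List[List[int]]) -> bool:
--     edge_count = {}
--     for s in surfaces:
--         n = len(s)
--         for i in range(n):
--             a = s[i]; b = s[(i+1) % n]
--             key = tuple(sorted((a,b)))
--             edge_count[key] = edge_count.get(key, 0) + 1
--     for s in surfaces:
--         if vertex_id in s:
--             idxs = [i for i,v in enumerate(s) if v == vertex_id]
--             for idx in idxs: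
--                 a = s[idx]; b = s[(idx+1) % len(s)]
--                 if edge_count.get(tuple(sorted((a,b))), 0) == 1:
--                     return True
--     return False
-- ===== SOURCE B (Python) =====
-- from typing import List
--
-- def is_boundary_vertex(vertex_id: int, surfaces: List[List[int]]) -> bool:
--     # One pass: emit every normalized edge, remembering which ones leave vertex_id.
--     edges = []
--     outgoing = []
--     for s in surfaces:
--         n = len(s)
--         for i in range(n):
--             a, b = s[i], s[(i + 1) % n]
--             e = (a, b) if a <= b else (b, a)
--             edges.append(e)
--             if a == vertex_id:
--                 outgoing.append(e)
--     # Sort, then scan runs: an edge lies on the boundary iff its run has length 1.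
--     edges.sort()
--     boundary = []
--     m = len(edges)
--     i = 0
--     while i < m:
--         j = i
--         while j < m and edges[j] == edges[i]:
--             j += 1
--         if j == i + 1:
--             boundary.append(edges[i])
--         i = j
--     return any(e in boundary for e in outgoing)
-- ===== Notes on version B (the rewrite author's own statement) =====
-- stated objective: alternative
-- what changed: A hashes every edge into a count dict and then re-scans surfaces for the vertex's occurrences with an early return; B makes one pass emitting all normalized edges while recording the ones leaving the vertex, then sorts the edge list and scans its runs to find edges of multiplicity 1, returning whether any recorded outgoing edge is among them (sort-and-scan instead of hash counting).
import Mathlib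
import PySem

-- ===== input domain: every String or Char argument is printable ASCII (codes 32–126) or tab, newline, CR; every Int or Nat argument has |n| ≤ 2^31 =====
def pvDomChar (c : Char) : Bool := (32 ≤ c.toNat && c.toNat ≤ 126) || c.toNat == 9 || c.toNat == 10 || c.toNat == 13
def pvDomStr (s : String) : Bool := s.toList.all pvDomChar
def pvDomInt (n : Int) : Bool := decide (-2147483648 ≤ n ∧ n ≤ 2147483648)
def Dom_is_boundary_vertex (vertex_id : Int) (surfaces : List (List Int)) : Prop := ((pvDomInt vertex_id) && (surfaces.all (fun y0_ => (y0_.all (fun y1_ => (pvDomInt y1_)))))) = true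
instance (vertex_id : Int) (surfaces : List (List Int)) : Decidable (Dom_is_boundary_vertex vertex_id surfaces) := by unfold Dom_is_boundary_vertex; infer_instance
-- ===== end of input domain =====

-- B replaces A's hash-counting (edge-count dict + second scan with early return) by sort-and-scan:
-- one pass emits all normalized edges and the ones leaving the vertex, a sort groups duplicates,
-- and a run scan finds the multiplicity-1 edges (alternative algorithm, not claimed faster).

-- tuple(sorted((a,b))) on two ints
def sortPair (a b : Int) : Int × Int := if a ≤ b then (a, b) else (b, a)

-- ===== PORT A =====
-- first loop of A: edge_count over all surfaces
def pvEdgeCountA (surfaces : List (List Int)) : PySem.Dict (Int × Int) Int :=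
  surfaces.foldl (fun d s =>
    (PySem.List.pyRange 0 (s.length : Int)).foldl (fun d i =>
      let a := PySem.List.pyGetD s i 0
      let b := PySem.List.pyGetD s (PySem.Int.mod (i + 1) (s.length : Int)) 0
      let key := sortPair a b
      d.insert key (d.getD key 0 + 1)) d) PySem.Dict.empty

-- second loop of A: scan surfaces for occurrences of vertex_id, early return on a count-1 edge
def pvSearchA (vid : Int) (d : PySem.Dict (Int × Int) Int) : List (List Int) → Bool
  | [] => false
  | s :: rest =>
    if s.contains vid then
      let idxs := (PySem.List.enumerate s).filterMap (fun p => if p.2 == vid then some p.1 else none)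
      if idxs.any (fun idx =>
          let a := PySem.List.pyGetD s idx 0
          let b := PySem.List.pyGetD s (PySem.Int.mod (idx + 1) (s.length : Int)) 0
          d.getD (sortPair a b) 0 == 1) then true
      else pvSearchA vid d rest
    else pvSearchA vid d rest

def is_boundary_vertex (vertex_id : Int) (surfaces : List (List Int)) : Bool :=
  pvSearchA vertex_id (pvEdgeCountA surfaces) surfaces

-- ===== PORT B =====
-- single emitting pass of B: (edges, outgoing)
def pvCollectB (vid : Int) (surfaces : List (List Int)) : List (Int × Int) × List (Int × Int) :=
  surfaces.foldl (fun acc s =>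
    (PySem.List.pyRange 0 (s.length : Int)).foldl (fun acc i =>
      let a := PySem.List.pyGetD s i 0
      let b := PySem.List.pyGetD s (PySem.Int.mod (i + 1) (s.length : Int)) 0
      let e := if a ≤ b then (a, b) else (b, a)
      (acc.1 ++ [e], if a == vid then acc.2 ++ [e] else acc.2)) acc) ([], [])

-- run scan of B over the sorted edge list: keep the head of each run of length 1
def pvRunsB : List (Int × Int) → List (Int × Int)
  | [] => []
  | e :: rest =>
    (if (rest.takeWhile (· == e)).isEmpty then [e] else []) ++ pvRunsB (rest.dropWhile (· == e))
termination_by l => l.length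
decreasing_by
  simp only [List.length_cons]
  exact Nat.lt_succ_of_le (List.length_dropWhile_le _ _)

def is_boundary_vertex_alt (vertex_id : Int) (surfaces : List (List Int)) : Bool :=
  let p := pvCollectB vertex_id surfaces
  -- edges.sort(): Python's tuple sort is the lexicographic order, ported as sorted with the Lex key
  let sortedEdges := PySem.List.sorted p.1 (fun e => (toLex e : Lex (Int × Int)))
  let boundary := pvRunsB sortedEdges
  p.2.any (fun e => boundary.contains e)

-- ===== PRECONDITION & SPEC =====
def Spec_is_boundary_vertex (vertex_id : Int) (surfaces : List (List Int)) (out : Bool) : Prop := out = is_boundary_vertex_alt vertex_id surfaces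
instance (vertex_id : Int) (surfaces : List (List Int)) (out : Bool) : Decidable (Spec_is_boundary_vertex vertex_id surfaces out) := by unfold Spec_is_boundary_vertex; infer_instance

-- ===== CLAIM (what is proved, stated in full; the proofs are below) =====
def Claim_equal_is_boundary_vertex : Prop := ∀ (vertex_id : Int) (surfaces : List (List Int)), Dom_is_boundary_vertex vertex_id surfaces → Spec_is_boundary_vertex vertex_id surfaces (is_boundary_vertex vertex_id surfaces)

-- ===== LEMMAS AND PROOFS =====

-- proof-only abstractions
def edgeAt (s : List Int) (i : Nat) : Int × Int :=
  sortPair (s.getD i 0) (s.getD ((i + 1) % s.length) 0)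

def edgesOf (s : List Int) : List (Int × Int) := (List.range s.length).map (edgeAt s)

def occE (vid : Int) (s : List Int) : List (Int × Int) :=
  ((List.range s.length).filter (fun i => s.getD i 0 == vid)).map (edgeAt s)

def allE (surfaces : List (List Int)) : List (Int × Int) := surfaces.flatMap edgesOf

def candL (vid : Int) (surfaces : List (List Int)) : List (Int × Int) :=
  surfaces.flatMap (occE vid)

-- the inner index loop produces exactly edgeAt s i for i ∈ range s.length
lemma pyBody_eq (s : List Int) (i : Nat) (_hi : i < s.length) :
    sortPair (PySem.List.pyGetD s (i : Int) 0)
      (PySem.List.pyGetD s (PySem.Int.mod ((i : Int) + 1) (s.length : Int)) 0) = edgeAt s i := by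
  have h1 : ((i : Int) + 1) = ((i + 1 : Nat) : Int) := by push_cast; ring
  rw [h1, PySem.Int.mod_natCast, PySem.List.pyGetD_natCast, PySem.List.pyGetD_natCast, edgeAt]

lemma innerCount_eq (s : List Int) (d : PySem.Dict (Int × Int) Int) :
    (PySem.List.pyRange 0 (s.length : Int)).foldl (fun d i =>
        let a := PySem.List.pyGetD s i 0
        let b := PySem.List.pyGetD s (PySem.Int.mod (i + 1) (s.length : Int)) 0
        let key := sortPair a b
        d.insert key (d.getD key 0 + 1)) d
    = (edgesOf s).foldl (fun d x => d.insert x (d.getD x 0 + 1)) d := by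
  rw [PySem.List.pyRange_zero_natCast, List.foldl_map, edgesOf, List.foldl_map]
  apply PySem.List.foldl_congr_mem
  intro acc i hi
  simp only [List.mem_range] at hi
  simp only [pyBody_eq s i hi]

lemma edgeCount_getD (surfaces : List (List Int)) (v : Int × Int) :
    (pvEdgeCountA surfaces).getD v 0 = ((allE surfaces).count v : Int) := by
  unfold pvEdgeCountA
  rw [PySem.List.foldl_congr_mem _ _ (fun d s => (edgesOf s).foldl (fun d x => d.insert x (d.getD x 0 + 1)) d) _
        (fun acc s _ => innerCount_eq s acc),
      ← List.foldl_flatMap]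
  rw [show surfaces.flatMap edgesOf = allE surfaces from rfl,
      PySem.Dict.getD_foldl_insert_add_one]
  simp [pysem]

-- membership in PySem.List.enumerate
lemma mem_enumerate (s : List Int) (k : Int) (p : Int × Int) :
    p ∈ PySem.List.enumerate s k ↔ ∃ i : Nat, i < s.length ∧ p = (k + i, s.getD i 0) := by
  induction s generalizing k with
  | nil => simp [PySem.List.enumerate]
  | cons x t ih =>
    simp only [PySem.List.enumerate, List.mem_cons, ih]
    constructor
    · rintro (rfl | ⟨i, hi, rfl⟩)
      · exact ⟨0, by simp⟩
      · exact ⟨i + 1, by simpa using hi, by push_cast; simp [List.getD]; ring_nf⟩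
    · rintro ⟨i, hi, rfl⟩
      cases i with
      | zero => left; simp
      | succ j =>
        right; exact ⟨j, by simpa using hi, by push_cast; simp [List.getD]; ring_nf⟩

lemma occE_mem (vid : Int) (s : List Int) (e : Int × Int) :
    e ∈ occE vid s ↔ ∃ i : Nat, i < s.length ∧ s.getD i 0 = vid ∧ e = edgeAt s i := by
  simp only [occE, List.mem_map, List.mem_filter, List.mem_range, beq_iff_eq]
  constructor
  · rintro ⟨i, ⟨hi, hv⟩, rfl⟩; exact ⟨i, hi, hv, rfl⟩
  · rintro ⟨i, hi, hv, rfl⟩; exact ⟨i, ⟨hi, hv⟩, rfl⟩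

lemma occE_nil_of_not_mem (vid : Int) (s : List Int) (h : vid ∉ s) : occE vid s = [] := by
  unfold occE
  rw [List.filter_eq_nil_iff.2, List.map_nil]
  intro i hi
  simp only [List.mem_range] at hi
  simp only [beq_iff_eq, List.getD_eq_getElem?_getD, List.getElem?_eq_getElem hi, Option.getD_some]
  intro hv; exact h (hv ▸ List.getElem_mem hi)

lemma searchA_iff (vid : Int) (d : PySem.Dict (Int × Int) Int) (surfaces : List (List Int)) :
    pvSearchA vid d surfaces = true ↔ ∃ e ∈ candL vid surfaces, d.getD e 0 = 1 := by
  induction surfaces with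
  | nil => simp [pvSearchA, candL]
  | cons s rest ih =>
    have hcand : candL vid (s :: rest) = occE vid s ++ candL vid rest := by
      simp [candL]
    rw [hcand]
    by_cases hmem : vid ∈ s
    · have hc : s.contains vid = true := by simpa using hmem
      simp only [pvSearchA, hc, if_true]
      by_cases hany : (((PySem.List.enumerate s).filterMap (fun p => if p.2 == vid then some p.1 else none)).any (fun idx =>
          let a := PySem.List.pyGetD s idx 0
          let b := PySem.List.pyGetD s (PySem.Int.mod (idx + 1) (s.length : Int)) 0
          d.getD (sortPair a b) 0 == 1)) = true
      · rw [if_pos hany]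
        simp only [true_iff]
        rw [List.any_eq_true] at hany
        obtain ⟨idx, hidx, hval⟩ := hany
        rw [List.mem_filterMap] at hidx
        obtain ⟨p, hp, hsome⟩ := hidx
        rw [mem_enumerate] at hp
        obtain ⟨i, hi, rfl⟩ := hp
        simp only [beq_iff_eq] at hsome
        split_ifs at hsome with hv
        · cases hsome
          simp only [zero_add, beq_iff_eq] at hval
          rw [pyBody_eq s i hi] at hval
          exact ⟨edgeAt s i, List.mem_append_left _ ((occE_mem vid s _).2 ⟨i, hi, hv, rfl⟩), hval⟩
      · rw [if_neg hany, ih]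
        rw [List.any_eq_true] at hany
        constructor
        · rintro ⟨e, he, hval⟩
          refine ⟨e, List.mem_append_right _ he, hval⟩
        · rintro ⟨e, he, hval⟩
          rcases List.mem_append.1 he with h1 | h2
          · exfalso
            obtain ⟨i, hi, hv, rfl⟩ := (occE_mem vid s e).1 h1
            apply hany
            refine ⟨(i : Int), ?_, ?_⟩
            · rw [List.mem_filterMap]
              exact ⟨((i : Int), s.getD i 0), (mem_enumerate s 0 _).2 ⟨i, hi, by simp⟩,
                by simpa [List.getD] using hv⟩
            · simp only [beq_iff_eq]
              rw [pyBody_eq s i hi]; exact hval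
          · exact ⟨e, h2, hval⟩
    · have hc : s.contains vid = false := by simpa using hmem
      simp only [pvSearchA, hc, Bool.false_eq_true, if_false]
      rw [ih, occE_nil_of_not_mem vid s hmem, List.nil_append]

lemma a_iff (vid : Int) (surfaces : List (List Int)) :
    is_boundary_vertex vid surfaces = true ↔
      ∃ e ∈ candL vid surfaces, ((allE surfaces).count e : Int) = 1 := by
  unfold is_boundary_vertex
  rw [searchA_iff]
  constructor
  · rintro ⟨e, he, hval⟩
    rw [edgeCount_getD] at hval
    exact ⟨e, he, hval⟩
  · rintro ⟨e, he, hval⟩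
    exact ⟨e, he, by rw [edgeCount_getD]; exact hval⟩

-- ===== B-side lemmas =====

-- generic shape of B's emitting fold over a list of indices
lemma foldl_emit (f : Nat → Int × Int) (p : Nat → Bool) :
    ∀ (l : List Nat) (acc : List (Int × Int) × List (Int × Int)),
    l.foldl (fun acc i => (acc.1 ++ [f i], if p i then acc.2 ++ [f i] else acc.2)) acc
      = (acc.1 ++ l.map f, acc.2 ++ (l.filter p).map f) := by
  intro l
  induction l with
  | nil => intro acc; simp
  | cons x t ih =>
    intro acc
    simp only [List.foldl_cons, ih, List.map_cons, List.filter_cons]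
    by_cases hx : p x = true
    · simp [hx]
    · simp [hx]

lemma innerCollect_eq (vid : Int) (s : List Int) (acc : List (Int × Int) × List (Int × Int)) :
    (PySem.List.pyRange 0 (s.length : Int)).foldl (fun acc i =>
        let a := PySem.List.pyGetD s i 0
        let b := PySem.List.pyGetD s (PySem.Int.mod (i + 1) (s.length : Int)) 0
        let e := if a ≤ b then (a, b) else (b, a)
        (acc.1 ++ [e], if a == vid then acc.2 ++ [e] else acc.2)) acc
    = (acc.1 ++ edgesOf s, acc.2 ++ occE vid s) := by
  rw [PySem.List.pyRange_zero_natCast, List.foldl_map]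
  rw [PySem.List.foldl_congr_mem _ _
        (fun acc i => (acc.1 ++ [edgeAt s i], if s.getD i 0 == vid then acc.2 ++ [edgeAt s i] else acc.2)) _ ?_]
  · rw [foldl_emit (edgeAt s) (fun i => s.getD i 0 == vid) (List.range s.length) acc]
    rfl
  · intro acc i hi
    simp only [List.mem_range] at hi
    have h1 : ((i : Int) + 1) = ((i + 1 : Nat) : Int) := by push_cast; ring
    simp only [h1, PySem.Int.mod_natCast, PySem.List.pyGetD_natCast]
    rfl

lemma collect_eq (vid : Int) (surfaces : List (List Int)) :
    pvCollectB vid surfaces = (allE surfaces, candL vid surfaces) := by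
  unfold pvCollectB
  rw [PySem.List.foldl_congr_mem _ _
        (fun acc s => (acc.1 ++ edgesOf s, acc.2 ++ occE vid s)) _
        (fun acc s _ => innerCollect_eq vid s acc)]
  have gen : ∀ (l : List (List Int)) (acc : List (Int × Int) × List (Int × Int)),
      l.foldl (fun acc s => (acc.1 ++ edgesOf s, acc.2 ++ occE vid s)) acc
        = (acc.1 ++ l.flatMap edgesOf, acc.2 ++ l.flatMap (occE vid)) := by
    intro l
    induction l with
    | nil => intro acc; simp
    | cons s t ih => intro acc; simp [ih]
  rw [gen]
  simp [allE, candL]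

-- the head of a dropWhile fails the predicate
lemma dropWhile_head_false (p : Int × Int → Bool) :
    ∀ (l : List (Int × Int)) {h : Int × Int} {t : List (Int × Int)},
      l.dropWhile p = h :: t → p h = false := by
  intro l
  induction l with
  | nil => intro h t hh; simp [List.dropWhile] at hh
  | cons x xs ih =>
    intro h t hh
    by_cases hx : p x = true
    · rw [List.dropWhile_cons_of_pos hx] at hh; exact ih hh
    · rw [List.dropWhile_cons_of_neg hx] at hh
      cases hh; simpa using hx

-- run scan on a lex-sorted list keeps exactly the elements of multiplicity 1
lemma runs_mem (x : Int × Int) :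
    ∀ (l : List (Int × Int)),
      l.Pairwise (fun a b => (toLex a : Lex (Int × Int)) ≤ toLex b) →
      (x ∈ pvRunsB l ↔ l.count x = 1) := by
  intro l
  induction l using pvRunsB.induct with
  | case1 => intro _; simp [pvRunsB]
  | case2 e rest ih =>
    intro hp
    have hsplit : rest.takeWhile (· == e) ++ rest.dropWhile (· == e) = rest :=
      List.takeWhile_append_dropWhile
    have hrun : ∀ y ∈ rest.takeWhile (· == e), y = e := by
      intro y hy
      have := List.mem_takeWhile_imp hy
      simpa using this
    have hptail : rest.Pairwise (fun a b => (toLex a : Lex (Int × Int)) ≤ toLex b) :=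
      (List.pairwise_cons.1 hp).2
    have hhead : ∀ y ∈ rest, (toLex e : Lex (Int × Int)) ≤ toLex y :=
      (List.pairwise_cons.1 hp).1
    have hpr' : (rest.dropWhile (· == e)).Pairwise (fun a b => (toLex a : Lex (Int × Int)) ≤ toLex b) :=
      hptail.sublist (List.dropWhile_sublist _)
    have her : e ∉ rest.dropWhile (· == e) := by
      intro hmem
      cases hd : rest.dropWhile (· == e) with
      | nil => rw [hd] at hmem; simp at hmem
      | cons h t =>
        have hhf : (h == e) = false := dropWhile_head_false (fun x => x == e) rest hd
        rw [hd] at hmem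
        rcases List.mem_cons.1 hmem with heq | hmem'
        · rw [← heq] at hhf; simp at hhf
        · -- h precedes e in the sorted remainder, and e ≤ h from the head: antisymmetry
          have hh_mem_rest : h ∈ rest := (List.dropWhile_sublist (p := (· == e)) (l := rest)).mem
            (by rw [hd]; exact List.mem_cons_self)
          have h1 : (toLex e : Lex (Int × Int)) ≤ toLex h := hhead h hh_mem_rest
          have h2 : (toLex h : Lex (Int × Int)) ≤ toLex e := by
            have := (List.pairwise_cons.1 (hd ▸ hpr')).1
            exact this e hmem'
          have : (toLex h : Lex (Int × Int)) = toLex e := le_antisymm h2 h1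
          have : h = e := toLex.injective this
          rw [this] at hhf; simp at hhf
    have hcount_rest' : (rest.dropWhile (· == e)).count e = 0 :=
      List.count_eq_zero.2 her
    have hcount_run : (rest.takeWhile (· == e)).count e = (rest.takeWhile (· == e)).length :=
      List.count_eq_length.2 (fun y hy => (hrun y hy).symm)
    have hmem_unfold : x ∈ pvRunsB (e :: rest) ↔
        (((rest.takeWhile (· == e)).isEmpty ∧ x = e) ∨ x ∈ pvRunsB (rest.dropWhile (· == e))) := by
      rw [pvRunsB]
      by_cases hemp : (rest.takeWhile (· == e)).isEmpty
      · simp [hemp]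
      · simp [hemp]
    by_cases hx : x = e
    · subst hx
      have hrest_count : rest.count x = (rest.takeWhile (· == x)).length := by
        conv_lhs => rw [← hsplit]
        rw [List.count_append, hcount_run, hcount_rest']
        omega
      have hcount : (x :: rest).count x =
          1 + (rest.takeWhile (· == x)).length := by
        rw [List.count_cons_self, hrest_count]; omega
      rw [hmem_unfold, hcount]
      have hnot : x ∉ pvRunsB (rest.dropWhile (· == x)) := by
        intro hmem
        have := (ih hpr').1 hmem
        rw [hcount_rest'] at this
        exact absurd this (by omega)
      constructor
      · rintro (⟨hemp, _⟩ | hmem)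
        · rw [List.isEmpty_iff] at hemp; rw [hemp]; simp
        · exact absurd hmem hnot
      · intro hc
        left
        refine ⟨?_, rfl⟩
        rw [List.isEmpty_iff, ← List.length_eq_zero_iff]
        omega
    · have hcount : (e :: rest).count x = (rest.dropWhile (· == e)).count x := by
        rw [show (e :: rest).count x = rest.count x by simp [Ne.symm hx]]
        conv_lhs => rw [← hsplit]
        rw [List.count_append]
        have h0 : (rest.takeWhile (· == e)).count x = 0 :=
          List.count_eq_zero.2 (fun hmem => hx (hrun x hmem))
        omega
      rw [hmem_unfold, hcount, ← ih hpr']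
      constructor
      · rintro (⟨_, hxe⟩ | hmem)
        · exact absurd hxe hx
        · exact hmem
      · intro hmem; exact Or.inr hmem

lemma alt_iff (vid : Int) (surfaces : List (List Int)) :
    is_boundary_vertex_alt vid surfaces = true ↔
      ∃ e ∈ candL vid surfaces, ((allE surfaces).count e : Int) = 1 := by
  unfold is_boundary_vertex_alt
  rw [collect_eq]
  simp only [List.any_eq_true, List.contains_iff_mem]
  constructor
  · rintro ⟨e, he, hmem⟩
    have hs := (runs_mem e _ (PySem.List.sorted_pairwise _ _)).1 hmem
    rw [(PySem.List.sorted_perm (allE surfaces) _ false).count_eq] at hs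
    exact ⟨e, he, by exact_mod_cast hs⟩
  · rintro ⟨e, he, hc⟩
    refine ⟨e, he, (runs_mem e _ (PySem.List.sorted_pairwise _ _)).2 ?_⟩
    rw [(PySem.List.sorted_perm (allE surfaces) _ false).count_eq]
    exact_mod_cast hc

-- ===== VERDICT (by name: the statement is the Claim_ definition above) =====
theorem is_boundary_vertex_spec : Claim_equal_is_boundary_vertex := by
  intro vid surfaces _
  unfold Spec_is_boundary_vertex
  rw [Bool.eq_iff_iff, a_iff, alt_iff]
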